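-- pv_equiv track=rewrite | github.com/kyuns-96/sanity_log_parser | src/sanity_log_parser/gca/distances.py | _classify_level
-- ===== SOURCE A (Python) =====
-- def _classify_level(
--     gid_to_val: dict[str, str],
--     gt_cluster_map: dict[str, int],
-- ) -> str:
--     """Classify a single hierarchy level as signal or noise.
--
--     - "noise": varies within at least one GT cluster (unusable, must exclude)
--     - "signal": uniform within each GT cluster AND differs between clusters
--     - "constant": uniform within AND between all clusters (no information)
--     """
--     # Group values by GT cluster
--     cluster_vals: dict[int, set[str]] = {}
--     for gid, val in gid_to_val.items():
--         ci = gt_cluster_map.get(gid)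
--         if ci is None:
--             continue
--         cluster_vals.setdefault(ci, set()).add(val)
--
--     if not cluster_vals:
--         return "unknown"
--
--     # If any cluster has multiple values at this level -> noise (primary check)
--     varies_within = any(len(vals) > 1 for vals in cluster_vals.values())
--     if varies_within:
--         return "noise"
--
--     # Check if different clusters have different values (discriminating)
--     representative_vals = [next(iter(vals)) for vals in cluster_vals.values()]
--     if len(set(representative_vals)) > 1:
--         return "signal"
--
--     return "constant"
-- ===== SOURCE B (Python) =====
-- def _classify_level(
--     gid_to_val: dict[str, str],
--     gt_cluster_map: dict[str, int],
-- ) -> str: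
--     """Relational reformulation: flatten the input to the list of
--     (cluster, value) pairs, then classify by two existential queries on
--     that list -- no grouping structure is ever built.
--
--     - noise    <=> two pairs share a cluster but disagree on the value
--     - signal   <=> no such conflict, but not all values are equal
--     - constant <=> all values equal;  unknown <=> no pair at all
--     """
--     pairs = [(gt_cluster_map[g], v) for g, v in gid_to_val.items() if g in gt_cluster_map]
--     if not pairs:
--         return "unknown"
--     if any(c1 == c2 and v1 != v2 for c1, v1 in pairs for c2, v2 in pairs):
--         return "noise"
--     if any(v != pairs[0][1] for _, v in pairs):
--         return "signal"
--     return "constant"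
-- ===== Notes on version B (the rewrite author's own statement) =====
-- stated objective: alternative
-- what changed: Replaces A's build-a-dict-of-sets-then-scan-it structure with a relational formulation: flatten to a list of (cluster, value) pairs and decide noise/signal/constant by existential queries over that list, with no grouping container at all.
import Mathlib
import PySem

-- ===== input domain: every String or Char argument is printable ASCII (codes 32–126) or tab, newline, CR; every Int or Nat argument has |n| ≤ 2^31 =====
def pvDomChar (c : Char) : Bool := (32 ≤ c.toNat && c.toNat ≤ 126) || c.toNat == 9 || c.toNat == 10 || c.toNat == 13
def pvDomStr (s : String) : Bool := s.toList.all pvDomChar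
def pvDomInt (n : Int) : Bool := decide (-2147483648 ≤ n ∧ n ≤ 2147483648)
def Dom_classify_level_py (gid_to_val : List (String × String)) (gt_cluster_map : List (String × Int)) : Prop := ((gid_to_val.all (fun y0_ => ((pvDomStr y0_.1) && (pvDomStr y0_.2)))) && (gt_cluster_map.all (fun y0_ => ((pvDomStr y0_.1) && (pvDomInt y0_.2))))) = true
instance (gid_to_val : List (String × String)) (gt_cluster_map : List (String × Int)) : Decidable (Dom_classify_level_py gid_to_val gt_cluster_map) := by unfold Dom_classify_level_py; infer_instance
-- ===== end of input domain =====

-- B replaces A's dict-of-sets grouping by a relational formulation over the flat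
-- (cluster, value) pair list (objective: alternative; not claimed faster).

-- ===== PORT A =====
-- gt_cluster_map.get(gid)
def pvGtGet (gt_cluster_map : List (String × Int)) (gid : String) : Option Int :=
  (PySem.Dict.mk gt_cluster_map).get? gid

-- loop body of A: cluster_vals.setdefault(ci, set()).add(val)
def pvStepA (gt_cluster_map : List (String × Int))
    (cv : PySem.Dict Int (PySem.Set String)) (p : String × String) :
    PySem.Dict Int (PySem.Set String) :=
  match pvGtGet gt_cluster_map p.1 with
  | none => cv
  | some ci => cv.modify ci (PySem.Set.empty) (fun s => s.add p.2)

-- the local variable cv of A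
def pvCv (gid_to_val : List (String × String)) (gt_cluster_map : List (String × Int)) :
    PySem.Dict Int (PySem.Set String) :=
  gid_to_val.foldl (pvStepA gt_cluster_map) (PySem.Dict.mk [])

def classify_level_py (gid_to_val : List (String × String)) (gt_cluster_map : List (String × Int)) : String :=
  let cv := pvCv gid_to_val gt_cluster_map
  if cv.items.isEmpty then "unknown"
  else if cv.values.any (fun s => decide (1 < s.length)) then "noise"
  -- next(iter(vals)) ported as the set's first stored element (exact here: every set is
  -- a singleton on the branch where A evaluates it)
  else if 1 < (PySem.Set.ofList (cv.values.map (fun s => s.headD ""))).length then "signal"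
  else "constant"

-- ===== PORT B =====
-- the comprehension [(gt_cluster_map[g], v) for g, v in gid_to_val.items() if g in gt_cluster_map]
-- ('g in d' followed by 'd[g]' is the single lookup get?)
def pvPairs (gid_to_val : List (String × String)) (gt_cluster_map : List (String × Int)) :
    List (Int × String) :=
  gid_to_val.filterMap (fun p => (pvGtGet gt_cluster_map p.1).map (fun ci => (ci, p.2)))

def classify_level_py_alt (gid_to_val : List (String × String)) (gt_cluster_map : List (String × Int)) : String :=
  let pairs := pvPairs gid_to_val gt_cluster_map
  if pairs.isEmpty then "unknown"
  else if pairs.any (fun q1 => pairs.any (fun q2 => q1.1 == q2.1 && q1.2 != q2.2)) then "noise"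
  else if pairs.any (fun q => q.2 != (pairs.headD (0, "")).2) then "signal"
  else "constant"

-- ===== PRECONDITION & SPEC =====
def Spec_classify_level_py (gid_to_val : List (String × String)) (gt_cluster_map : List (String × Int)) (out : String) : Prop := out = classify_level_py_alt gid_to_val gt_cluster_map
instance (gid_to_val : List (String × String)) (gt_cluster_map : List (String × Int)) (out : String) : Decidable (Spec_classify_level_py gid_to_val gt_cluster_map out) := by unfold Spec_classify_level_py; infer_instance

-- ===== CLAIM (what is proved, stated in full; the proofs are below) =====
def Claim_equal_classify_level_py : Prop := ∀ (gid_to_val : List (String × String)) (gt_cluster_map : List (String × Int)), Dom_classify_level_py gid_to_val gt_cluster_map → Spec_classify_level_py gid_to_val gt_cluster_map (classify_level_py gid_to_val gt_cluster_map)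

-- ===== LEMMAS AND PROOFS =====

-- invariant: A's dict-of-sets cv groups exactly the (cluster, value) pairs P seen so far
def pvInv (cv : PySem.Dict Int (PySem.Set String)) (P : List (Int × String)) : Prop :=
  cv.keys.Nodup ∧
  (∀ p ∈ cv.items, p.2 ≠ [] ∧ p.2.Nodup) ∧
  (∀ ci v, (ci, v) ∈ P ↔ ∃ p ∈ cv.items, p.1 = ci ∧ v ∈ p.2)

theorem pv_step (gt_cluster_map : List (String × Int)) (x : String × String)
    (cv : PySem.Dict Int (PySem.Set String)) (P : List (Int × String))
    (h : pvInv cv P) :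
    pvInv (pvStepA gt_cluster_map cv x)
      (P ++ ((pvGtGet gt_cluster_map x.1).map (fun ci => (ci, x.2))).toList) := by
  obtain ⟨hnd, hset, hmem⟩ := h
  unfold pvStepA
  cases hlk : pvGtGet gt_cluster_map x.1 with
  | none => simpa using ⟨hnd, hset, hmem⟩
  | some ci =>
    simp only [Option.map_some, Option.toList_some]
    by_cases hc : cv.contains ci = true
    · -- existing cluster: the entry for ci gets x.2 added
      obtain ⟨s, hs⟩ : ∃ s, cv.get? ci = some s := by
        cases hg : cv.get? ci with
        | none =>
          rw [PySem.Dict.contains_eq_isSome_get?, hg] at hc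
          exact absurd hc (by simp)
        | some s => exact ⟨s, rfl⟩
      have hsi : (ci, s) ∈ cv.items := PySem.Dict.mem_items_of_get?_eq_some cv hs
      have hgetD : cv.getD ci PySem.Set.empty = s :=
        PySem.Dict.getD_of_get?_eq_some cv _ hs
      have hitems : (cv.modify ci PySem.Set.empty (fun t => t.add x.2)).items
          = cv.items.map (fun p => if p.1 == ci then (ci, s.add x.2) else p) := by
        unfold PySem.Dict.modify
        rw [hgetD, PySem.Dict.items_insert_of_contains cv _ hc]
      have hsne := hset _ hsi
      have huniq : ∀ p ∈ cv.items, p.1 = ci → p = (ci, s) := by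
        intro p hp hp1
        have := List.inj_on_of_nodup_map (by simpa [PySem.Dict.keys] using hnd) hp hsi
          (by simpa using hp1)
        rw [← this]
      refine ⟨?_, ?_, ?_⟩
      · have : (cv.modify ci PySem.Set.empty (fun t => t.add x.2)).keys = cv.keys := by
          rw [PySem.Dict.keys, hitems, List.map_map, PySem.Dict.keys]
          refine List.map_congr_left ?_
          intro p hp
          simp only [Function.comp_apply]
          by_cases hpc : (p.1 == ci) = true
          · rw [if_pos hpc]
            exact (by simpa using hpc : p.1 = ci).symm
          · rw [if_neg hpc]
        rw [this]; exact hnd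
      · rw [hitems]
        intro p hp
        obtain ⟨q, hq, hqe⟩ := List.mem_map.mp hp
        by_cases hqc : (q.1 == ci) = true
        · rw [← hqe, if_pos hqc]
          refine ⟨?_, PySem.Set.nodup_add _ _ hsne.2⟩
          intro habs
          have habs' : PySem.Set.add s x.2 = [] := habs
          have hx : x.2 ∈ PySem.Set.add s x.2 := by
            rw [PySem.Set.mem_add]; right; rfl
          rw [habs'] at hx; simp at hx
        · rw [← hqe, if_neg hqc]; exact hset q hq
      · intro ci' v
        rw [hitems]
        constructor
        · intro hv
          rcases List.mem_append.mp hv with hv | hv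
          · obtain ⟨p, hp, hp1, hp2⟩ := (hmem ci' v).mp hv
            by_cases hpc : (p.1 == ci) = true
            · have hpq : p = (ci, s) := huniq p hp (by simpa using hpc)
              refine ⟨(ci, s.add x.2), List.mem_map.mpr ⟨p, hp, by rw [if_pos hpc]⟩, ?_, ?_⟩
              · simp [← hp1, hpq]
              · rw [PySem.Set.mem_add]; left; rw [hpq] at hp2; exact hp2
            · exact ⟨p, List.mem_map.mpr ⟨p, hp, by rw [if_neg hpc]⟩, hp1, hp2⟩
          · simp only [List.mem_singleton, Prod.mk.injEq] at hv
            refine ⟨(ci, s.add x.2), List.mem_map.mpr ⟨(ci, s), hsi, by simp⟩, hv.1.symm, ?_⟩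
            rw [PySem.Set.mem_add]; right; exact hv.2
        · rintro ⟨p, hp, hp1, hp2⟩
          obtain ⟨q, hq, hqe⟩ := List.mem_map.mp hp
          by_cases hqc : (q.1 == ci) = true
          · rw [if_pos hqc] at hqe
            rw [← hqe] at hp1 hp2
            rw [PySem.Set.mem_add] at hp2
            rcases hp2 with hp2 | hp2
            · exact List.mem_append.mpr (Or.inl ((hmem ci' v).mpr ⟨(ci, s), hsi, hp1, hp2⟩))
            · exact List.mem_append.mpr (Or.inr (by simp [← hp1, hp2]))
          · rw [if_neg hqc] at hqe
            rw [← hqe] at hp1 hp2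
            exact List.mem_append.mpr (Or.inl ((hmem ci' v).mpr ⟨q, hq, hp1, hp2⟩))
    · -- fresh cluster: a new singleton entry is appended
      have hc' : cv.contains ci = false := by simpa using hc
      have hgetD : cv.getD ci PySem.Set.empty = PySem.Set.empty :=
        PySem.Dict.getD_of_not_contains cv _ hc'
      have haddempty : PySem.Set.add PySem.Set.empty x.2 = [x.2] := rfl
      have hitems : (cv.modify ci PySem.Set.empty (fun t => t.add x.2)).items
          = cv.items ++ [(ci, [x.2])] := by
        unfold PySem.Dict.modify
        rw [hgetD, PySem.Dict.items_insert_of_not_contains cv _ hc']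
        rfl
      have hnomem : ∀ p ∈ cv.items, p.1 ≠ ci := by
        intro p hp habs
        have : cv.contains ci = true := by
          rw [PySem.Dict.contains_iff_mem_keys cv ci]
          exact habs ▸ PySem.Dict.mem_keys_of_mem_items cv hp
        rw [hc'] at this; exact Bool.false_ne_true this
      refine ⟨?_, ?_, ?_⟩
      · have : (cv.modify ci PySem.Set.empty (fun t => t.add x.2)).keys
            = cv.keys ++ [ci] := by
          rw [PySem.Dict.keys, hitems, List.map_append, PySem.Dict.keys]; rfl
        rw [this]
        refine List.Nodup.append hnd (List.nodup_singleton ci) ?_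
        intro a ha hb
        simp only [List.mem_singleton] at hb
        obtain ⟨p, hp, hpe⟩ := List.mem_map.mp ha
        exact hnomem p hp (by rw [hpe, hb])
      · rw [hitems]
        intro p hp
        rcases List.mem_append.mp hp with hp | hp
        · exact hset p hp
        · simp only [List.mem_singleton] at hp
          rw [hp]; exact ⟨List.cons_ne_nil _ _, List.nodup_singleton _⟩
      · intro ci' v
        rw [hitems]
        constructor
        · intro hv
          rcases List.mem_append.mp hv with hv | hv
          · obtain ⟨p, hp, hp1, hp2⟩ := (hmem ci' v).mp hv
            exact ⟨p, List.mem_append.mpr (Or.inl hp), hp1, hp2⟩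
          · simp only [List.mem_singleton, Prod.mk.injEq] at hv
            exact ⟨(ci, [x.2]), List.mem_append.mpr (Or.inr (by simp)),
              hv.1.symm, by simp [hv.2]⟩
        · rintro ⟨p, hp, hp1, hp2⟩
          rcases List.mem_append.mp hp with hp | hp
          · exact List.mem_append.mpr (Or.inl ((hmem ci' v).mpr ⟨p, hp, hp1, hp2⟩))
          · simp only [List.mem_singleton] at hp
            rw [hp] at hp1 hp2
            simp only [List.mem_singleton] at hp2
            exact List.mem_append.mpr (Or.inr (by simp [← hp1, hp2]))

theorem pv_loop (gt_cluster_map : List (String × Int)) (l : List (String × String))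
    (cv : PySem.Dict Int (PySem.Set String)) (P : List (Int × String))
    (h : pvInv cv P) :
    pvInv (l.foldl (pvStepA gt_cluster_map) cv) (P ++ pvPairs l gt_cluster_map) := by
  induction l generalizing cv P with
  | nil => simpa [pvPairs] using h
  | cons x t ih =>
    have h3 := ih (pvStepA gt_cluster_map cv x) _ (pv_step gt_cluster_map x cv P h)
    have hsplit : pvPairs (x :: t) gt_cluster_map
        = ((pvGtGet gt_cluster_map x.1).map (fun ci => (ci, x.2))).toList
          ++ pvPairs t gt_cluster_map := by
      unfold pvPairs
      rw [List.filterMap_cons]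
      cases pvGtGet gt_cluster_map x.1 <;> rfl
    rw [List.foldl_cons, hsplit, ← List.append_assoc]
    exact h3

-- a Python set has more than one element iff two of its sources differ
theorem pv_one_lt_ofList_iff (R : List String) :
    1 < (PySem.Set.ofList R).length ↔ ∃ a ∈ R, ∃ b ∈ R, a ≠ b := by
  constructor
  · intro h
    match hS : PySem.Set.ofList R with
    | [] => rw [hS] at h; simp at h
    | [a] => rw [hS] at h; simp at h
    | a :: b :: t =>
      have hnd := PySem.Set.nodup_ofList (xs := R)
      rw [hS] at hnd
      have hab : a ≠ b := by
        intro habs; rw [habs] at hnd; simp at hnd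
      have ha : a ∈ R := by
        rw [← PySem.Set.mem_ofList R a, hS]; simp
      have hb : b ∈ R := by
        rw [← PySem.Set.mem_ofList R b, hS]; simp
      exact ⟨a, ha, b, hb, hab⟩
  · rintro ⟨a, ha, b, hb, hab⟩
    have ha' : a ∈ PySem.Set.ofList R := (PySem.Set.mem_ofList R a).mpr ha
    have hb' : b ∈ PySem.Set.ofList R := (PySem.Set.mem_ofList R b).mpr hb
    match hS : PySem.Set.ofList R with
    | [] => rw [hS] at ha'; simp at ha'
    | [x] =>
      rw [hS] at ha' hb'
      simp only [List.mem_singleton] at ha' hb'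
      exact absurd (ha'.trans hb'.symm) hab
    | x :: y :: t => simp

-- ===== VERDICT (by name: the statement is the Claim_ definition above) =====
theorem classify_level_py_spec : Claim_equal_classify_level_py := by
  intro gid gt _
  unfold Spec_classify_level_py classify_level_py classify_level_py_alt
  have h0 : pvInv (PySem.Dict.mk []) [] := by
    refine ⟨by simp [PySem.Dict.keys], by simp, ?_⟩
    intro ci v; simp
  have hinv : pvInv (pvCv gid gt) (pvPairs gid gt) := by
    have := pv_loop gt gid (PySem.Dict.mk []) [] h0
    rw [List.nil_append] at this
    exact this
  obtain ⟨hnd, hset, hmem⟩ := hinv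
  set cv := pvCv gid gt with hcv
  set pairs := pvPairs gid gt with hpairs
  show (if cv.items.isEmpty = true then "unknown"
        else if (cv.values.any fun s => decide (1 < s.length)) = true then "noise"
        else if 1 < (PySem.Set.ofList (cv.values.map fun s => s.headD "")).length then "signal"
        else "constant")
      = (if pairs.isEmpty = true then "unknown"
        else if (pairs.any fun q1 => pairs.any fun q2 => q1.1 == q2.1 && q1.2 != q2.2) = true then "noise"
        else if (pairs.any fun q => q.2 != (pairs.headD (0, "")).2) = true then "signal"
        else "constant")
  -- (E) emptiness agrees
  have hE : cv.items.isEmpty = pairs.isEmpty := by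
    rcases hi : cv.items with _ | ⟨p, t⟩
    · rcases hq : pairs with _ | ⟨q, u⟩
      · rfl
      · exfalso
        have : (q.1, q.2) ∈ pairs := by rw [hq]; simp
        obtain ⟨p, hp, -, -⟩ := (hmem q.1 q.2).mp this
        rw [hi] at hp; simp at hp
    · rcases hq : pairs with _ | ⟨q, u⟩
      · exfalso
        have hpm : p ∈ cv.items := by rw [hi]; simp
        obtain ⟨hne, -⟩ := hset p hpm
        rcases hv : p.2 with _ | ⟨v, w⟩
        · exact hne hv
        · have : (p.1, v) ∈ pairs := (hmem p.1 v).mpr ⟨p, hpm, rfl, by rw [hv]; simp⟩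
          rw [hq] at this; simp at this
      · rfl
  rw [hE]
  by_cases hEmp : pairs.isEmpty = true
  · rw [hEmp]; simp
  · rw [Bool.not_eq_true] at hEmp
    rw [hEmp]
    simp only [if_neg Bool.false_ne_true]
    -- (N) noise condition agrees
    have hN : (cv.values.any (fun s => decide (1 < s.length)))
        = (pairs.any (fun q1 => pairs.any (fun q2 => q1.1 == q2.1 && q1.2 != q2.2))) := by
      rw [Bool.eq_iff_iff]
      simp only [List.any_eq_true, PySem.Dict.values, List.mem_map,
        decide_eq_true_eq, Bool.and_eq_true, bne_iff_ne, beq_iff_eq]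
      constructor
      · rintro ⟨s, ⟨p, hp, hps⟩, hlen⟩
        subst hps
        obtain ⟨-, hnds⟩ := hset p hp
        rcases hv : p.2 with _ | ⟨a, w⟩
        · rw [hv] at hlen; simp at hlen
        · rcases hw : w with _ | ⟨b, w2⟩
          · rw [hv, hw] at hlen; simp at hlen
          · rw [hv, hw] at hnds
            have hab : a ≠ b := by
              intro habs; rw [habs] at hnds; simp at hnds
            refine ⟨(p.1, a), (hmem p.1 a).mpr ⟨p, hp, rfl, by rw [hv]; simp⟩,
              (p.1, b), (hmem p.1 b).mpr ⟨p, hp, rfl, by rw [hv, hw]; simp⟩, rfl, hab⟩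
      · rintro ⟨q1, hq1, q2, hq2, hcc, hvv⟩
        obtain ⟨p1, hp1, hp1c, hp1v⟩ := (hmem q1.1 q1.2).mp (by simpa using hq1)
        obtain ⟨p2, hp2, hp2c, hp2v⟩ := (hmem q2.1 q2.2).mp (by simpa using hq2)
        have hpp : p1 = p2 := by
          refine List.inj_on_of_nodup_map (by simpa [PySem.Dict.keys] using hnd) hp1 hp2 ?_
          simp [hp1c, hp2c, hcc]
        rw [hpp] at hp1v
        refine ⟨p2.2, ⟨p2, hp2, rfl⟩, ?_⟩
        rcases hv : p2.2 with _ | ⟨a, w⟩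
        · rw [hv] at hp1v; simp at hp1v
        · rcases hw : w with _ | ⟨b, w2⟩
          · exfalso
            rw [hv, hw] at hp1v hp2v
            simp only [List.mem_singleton] at hp1v hp2v
            exact hvv (hp1v.trans hp2v.symm)
          · simp
    rw [hN]
    by_cases hNo : (pairs.any (fun q1 => pairs.any (fun q2 => q1.1 == q2.1 && q1.2 != q2.2))) = true
    · rw [hNo]; simp
    · rw [Bool.not_eq_true] at hNo
      rw [hNo]
      simp only [if_neg Bool.false_ne_true]
      -- no within-cluster variation: every stored set is a singleton
      have hNo' : ∀ q1 ∈ pairs, ∀ q2 ∈ pairs, q1.1 = q2.1 → q1.2 = q2.2 := by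
        intro q1 hq1 q2 hq2 hcc
        by_contra hvv
        rw [List.any_eq_false] at hNo
        have h1 := hNo q1 hq1
        rw [Bool.not_eq_true, List.any_eq_false] at h1
        have h2 := h1 q2 hq2
        simp [hcc] at h2
        exact hvv h2
      have hsing : ∀ p ∈ cv.items, p.2 = [p.2.headD ""] := by
        intro p hp
        obtain ⟨hne, hnds⟩ := hset p hp
        rcases hv : p.2 with _ | ⟨a, w⟩
        · exact absurd hv hne
        · rcases hw : w with _ | ⟨b, w2⟩
          · rfl
          · exfalso
            rw [hv, hw] at hnds
            have hab : a ≠ b := by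
              intro habs; rw [habs] at hnds; simp at hnds
            have h1 : (p.1, a) ∈ pairs := (hmem p.1 a).mpr ⟨p, hp, rfl, by rw [hv]; simp⟩
            have h2 : (p.1, b) ∈ pairs := (hmem p.1 b).mpr ⟨p, hp, rfl, by rw [hv, hw]; simp⟩
            exact hab (hNo' _ h1 _ h2 rfl)
      -- the values occurring in pairs are exactly the representative heads
      have hval : ∀ v, (∃ p ∈ cv.items, p.2.headD "" = v) ↔ ∃ q ∈ pairs, q.2 = v := by
        intro v
        constructor
        · rintro ⟨p, hp, hpv⟩
          have := hsing p hp
          exact ⟨(p.1, v), (hmem p.1 v).mpr ⟨p, hp, rfl, by rw [this, hpv]; simp⟩, rfl⟩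
        · rintro ⟨q, hq, hqv⟩
          obtain ⟨p, hp, -, hpv⟩ := (hmem q.1 q.2).mp (by simpa using hq)
          rw [hsing p hp] at hpv
          simp only [List.mem_singleton] at hpv
          exact ⟨p, hp, by rw [← hpv, hqv]⟩
      -- (S) signal condition agrees
      have hS : (1 < (PySem.Set.ofList (cv.values.map (fun s => s.headD ""))).length)
          ↔ ((pairs.any (fun q => q.2 != (pairs.headD (0, "")).2)) = true) := by
        rw [pv_one_lt_ofList_iff]
        simp only [List.any_eq_true, bne_iff_ne, PySem.Dict.values, List.map_map,
          List.mem_map, Function.comp]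
        rcases hq : pairs with _ | ⟨q0, u⟩
        · rw [hq] at hEmp; simp at hEmp
        constructor
        · rintro ⟨a, ⟨p1, hp1, hp1a⟩, b, ⟨p2, hp2, hp2b⟩, hab⟩
          obtain ⟨qa, hqa, hqav⟩ := (hval a).mp ⟨p1, hp1, hp1a⟩
          obtain ⟨qb, hqb, hqbv⟩ := (hval b).mp ⟨p2, hp2, hp2b⟩
          by_cases hh : a = ((q0 :: u).headD (0, "")).2
          · exact ⟨qb, by rw [← hq]; exact hqb, by
              simp only [hqbv]
              intro habs
              exact hab (by rw [hh, habs])⟩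
          · exact ⟨qa, by rw [← hq]; exact hqa, by simp only [hqav]; exact hh⟩
        · rintro ⟨q, hqm, hqv⟩
          have hq0 : q0 ∈ pairs := by rw [hq]; simp
          obtain ⟨p0, hp0, hp0v⟩ : ∃ p ∈ cv.items, p.2.headD "" = q0.2 :=
            (hval q0.2).mpr ⟨q0, hq0, rfl⟩
          have hqp : q ∈ pairs := by rw [hq]; exact hqm
          obtain ⟨pq, hpq, hpqv⟩ : ∃ p ∈ cv.items, p.2.headD "" = q.2 :=
            (hval q.2).mpr ⟨q, hqp, rfl⟩
          refine ⟨q.2, ⟨pq, hpq, hpqv⟩, q0.2, ⟨p0, hp0, hp0v⟩, ?_⟩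
          simpa using hqv
      by_cases hSig : (pairs.any (fun q => q.2 != (pairs.headD (0, "")).2)) = true
      · rw [if_pos (hS.mpr hSig), if_pos hSig]
      · rw [if_neg (fun h => hSig (hS.mp h)), if_neg hSig]
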